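-- pv_equiv track=rewrite | github.com/gavin-hyl/poetry-gen | poem_utils.py | line_syllable_count
-- ===== SOURCE A (Python) =====
-- def line_syllable_count(line, syllable_dict):
--     '''
--     Returns a list of the possible syllable counts for this line.
--     '''
--     line.reverse()
--     try:
--         possible_syllables = syllable_dict.get(line[0])[0] + syllable_dict.get(line[0])[1]
--     except:
--         possible_syllables = [2]
--     for word in line[1:]:
--         new_possibilities = []
--         try:
--             new_syllables = syllable_dict.get(word)[0]
--         except TypeError:
--             new_syllables = [2] # quick fix
--         for syl in new_syllables:
--             for prev_total in possible_syllables: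
--                 new_possibilities.append(syl + prev_total)
--         possible_syllables = new_possibilities
--     return possible_syllables
-- ===== SOURCE B (Python) =====
-- import itertools
--
-- def line_syllable_count(line, syllable_dict):
--     '''
--     Returns a list of the possible syllable counts for this line.
--     '''
--     line.reverse()
--     option_lists = []
--     try:
--         option_lists.append(syllable_dict.get(line[0])[0] + syllable_dict.get(line[0])[1])
--     except:
--         option_lists.append([2])
--     for word in line[1:]:
--         try:
--             option_lists.append(syllable_dict.get(word)[0])
--         except TypeError:
--             option_lists.append([2])
--     return [sum(combo) for combo in itertools.product(*reversed(option_lists))]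
-- ===== Notes on version B (the rewrite author's own statement) =====
-- stated objective: alternative
-- what changed: B first gathers the per-word syllable-option lists (with A's asymmetric exception defaults) and then produces all sums in one itertools.product pass, instead of A's incremental fold that rebuilds the possibilities list word by word.
import Mathlib
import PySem

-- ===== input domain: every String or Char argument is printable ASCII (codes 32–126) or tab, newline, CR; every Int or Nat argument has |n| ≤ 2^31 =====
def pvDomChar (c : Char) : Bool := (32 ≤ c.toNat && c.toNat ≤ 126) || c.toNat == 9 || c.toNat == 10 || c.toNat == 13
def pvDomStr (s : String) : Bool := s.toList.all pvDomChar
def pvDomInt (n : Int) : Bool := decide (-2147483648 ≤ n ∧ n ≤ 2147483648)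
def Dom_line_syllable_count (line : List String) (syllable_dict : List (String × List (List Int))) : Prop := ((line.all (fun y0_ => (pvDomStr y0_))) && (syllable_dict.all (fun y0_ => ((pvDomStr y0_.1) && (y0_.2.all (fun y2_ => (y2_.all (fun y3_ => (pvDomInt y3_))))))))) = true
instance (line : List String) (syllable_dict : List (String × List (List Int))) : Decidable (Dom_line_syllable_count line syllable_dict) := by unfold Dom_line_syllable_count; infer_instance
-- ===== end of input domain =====

-- B separates option-gathering from combining and replaces A's incremental fold by ONE cartesian
-- product of the per-word option lists (objective: alternative decomposition, same cost).
-- Both A and B reverse `line` in place (same observable mutation); equivalence is about the return value.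

-- ===== PORT A =====
def line_syllable_count (line : List String) (syllable_dict : List (String × List (List Int))) : List Int :=
  let rl := line.reverse
  let d : PySem.Dict String (List (List Int)) := ⟨syllable_dict⟩
  -- try: dict.get(line[0])[0] + dict.get(line[0])[1]  except: [2]  (bare except: any failure → [2])
  let possible0 : List Int :=
    match rl with
    | [] => [2]
    | w :: _ =>
      match PySem.Dict.get? d w with
      | some (a :: b :: _) => a ++ b
      | _ => [2]
  (rl.drop 1).foldl (fun possible word =>
    let newSyl : List Int :=
      match PySem.Dict.get? d word with
      | some (s :: _) => s
      | none => [2]          -- except TypeError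
      | some [] => []        -- Python raises IndexError here; excluded by Pre_
    newSyl.foldl (fun acc syl => acc ++ possible.map (fun p => syl + p)) []) possible0

-- ===== PORT B =====
-- itertools.product, leftmost factor varies slowest
def pyProduct (ls : List (List Int)) : List (List Int) :=
  match ls with
  | [] => [[]]
  | l :: rest => l.flatMap (fun x => (pyProduct rest).map (fun c => x :: c))

def line_syllable_count_alt (line : List String) (syllable_dict : List (String × List (List Int))) : List Int :=
  let rl := line.reverse
  let d : PySem.Dict String (List (List Int)) := ⟨syllable_dict⟩
  let first : List Int :=
    match rl.head? with
    | none => [2]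
    | some w =>
      match PySem.Dict.get? d w with
      | none => [2]
      | some [] => [2]
      | some [_] => [2]
      | some (a :: b :: _) => a ++ b
  let optionLists : List (List Int) :=
    first :: (rl.drop 1).map (fun word =>
      match PySem.Dict.get? d word with
      | none => [2]          -- except TypeError
      | some [] => [2]       -- Python raises IndexError here; excluded by Pre_
      | some (s :: _) => s)
  (pyProduct optionLists.reverse).map List.sum

-- ===== PRECONDITION & SPEC =====
-- Pre_ excludes exactly the inputs where A (and B) raise IndexError: a word other than the
-- original last one mapped by the dict to an EMPTY list of options.
def Pre_line_syllable_count (line : List String) (syllable_dict : List (String × List (List Int))) : Prop :=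
  ∀ w ∈ line.dropLast, PySem.Dict.get? (⟨syllable_dict⟩ : PySem.Dict String (List (List Int))) w ≠ some []

instance (line : List String) (syllable_dict : List (String × List (List Int))) : Decidable (Pre_line_syllable_count line syllable_dict) := by unfold Pre_line_syllable_count; infer_instance

def pvWitness_line_syllable_count : List String × (List (String × List (List Int))) :=
  (["big", "red", "dog"], [("big", [[1], [2]]), ("dog", [[1, 2], [3]])])

def Spec_line_syllable_count (line : List String) (syllable_dict : List (String × List (List Int))) (out : List Int) : Prop := out = line_syllable_count_alt line syllable_dict
instance (line : List String) (syllable_dict : List (String × List (List Int))) (out : List Int) : Decidable (Spec_line_syllable_count line syllable_dict out) := by unfold Spec_line_syllable_count; infer_instance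

-- ===== CLAIM (what is proved, stated in full; the proofs are below) =====
def Claim_equal_line_syllable_count : Prop := ∀ (line : List String) (syllable_dict : List (String × List (List Int))), Dom_line_syllable_count line syllable_dict → Pre_line_syllable_count line syllable_dict → Spec_line_syllable_count line syllable_dict (line_syllable_count line syllable_dict)

-- ===== LEMMAS AND PROOFS =====

-- A's inner two loops, as a single step function on the accumulator
def pvStep (possible : List Int) (o : List Int) : List Int :=
  o.foldl (fun acc syl => acc ++ possible.map (fun p => syl + p)) []

theorem pvStep_eq_flatMap (possible o : List Int) :
    pvStep possible o = o.flatMap (fun syl => possible.map (fun p => syl + p)) := by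
  unfold pvStep
  rw [PySem.List.foldl_append_eq_flatMap]
  simp

-- cartesian product + sum  =  fold of pvStep over the factors in reverse order
theorem pyProduct_sum (os : List (List Int)) (p0 : List Int) :
    (pyProduct (os ++ [p0])).map List.sum = os.reverse.foldl pvStep p0 := by
  induction os with
  | nil =>
    simp only [List.nil_append, List.reverse_nil, List.foldl_nil, pyProduct, List.map_flatMap]
    induction p0 with
    | nil => simp
    | cons x xs ihx => simp_all
  | cons o os ih =>
    simp only [List.cons_append, pyProduct, List.reverse_cons, List.foldl_append, List.foldl_cons,
      List.foldl_nil, List.map_flatMap, List.map_map]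
    rw [pvStep_eq_flatMap, ← ih]
    congr 1
    funext x
    simp [Function.comp, List.map_map]

theorem mem_reverse_drop_one {α : Type} (l : List α) (w : α) (h : w ∈ l.reverse.drop 1) :
    w ∈ l.dropLast := by
  rcases l.eq_nil_or_concat with rfl | ⟨l', a, rfl⟩
  · simp at h
  · simpa using h

-- ===== VERDICT (by name: the statement is the Claim_ definition above) =====
theorem line_syllable_count_spec : Claim_equal_line_syllable_count := by
  intro line syllable_dict _hdom hpre
  unfold Spec_line_syllable_count line_syllable_count line_syllable_count_alt
  simp only []
  rw [List.reverse_cons, pyProduct_sum, List.reverse_reverse, List.foldl_map]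
  have hinit : (match line.reverse.head? with
      | none => ([2] : List Int)
      | some w =>
        match PySem.Dict.get? (⟨syllable_dict⟩ : PySem.Dict String (List (List Int))) w with
        | none => [2]
        | some [] => [2]
        | some [_] => [2]
        | some (a :: b :: _) => a ++ b) =
      (match line.reverse with
      | [] => ([2] : List Int)
      | w :: _ =>
        match PySem.Dict.get? (⟨syllable_dict⟩ : PySem.Dict String (List (List Int))) w with
        | some (a :: b :: _) => a ++ b
        | _ => [2]) := by
    cases line.reverse with
    | nil => rfl
    | cons w t =>
      simp only [List.head?_cons]
      cases PySem.Dict.get? (⟨syllable_dict⟩ : PySem.Dict String (List (List Int))) w with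
      | none => rfl
      | some v =>
        match v with
        | [] => rfl
        | [_] => rfl
        | _ :: _ :: _ => rfl
  rw [hinit]
  apply PySem.List.foldl_congr_mem
  intro acc w hw
  have h := hpre w (mem_reverse_drop_one line w hw)
  unfold pvStep
  cases hg : PySem.Dict.get? (⟨syllable_dict⟩ : PySem.Dict String (List (List Int))) w with
  | none => simp
  | some v =>
    cases v with
    | nil => exact absurd hg h
    | cons s t => simp
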